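-- pv_equiv track=rewrite | github.com/ACaTreYu/ac-sprite-slicer | batch_auto_slicer.py | get_output_folder_name
-- ===== SOURCE A (Python) =====
-- def get_output_folder_name(sheet_info):
--     """
--     Generate a clean output folder name from the source path.
--
--     Examples:
--         "AC Default Sheets" -> "ac_default_sheets"
--         "Upscaled AC Sheets" -> "upscaled_ac_sheets"
--     """
--     # Combine parent and folder if parent exists
--     if sheet_info["parent"]:
--         name = f"{sheet_info['parent']}_{sheet_info['folder']}"
--     else:
--         name = sheet_info["folder"]
--
--     # Clean up the name
--     name = name.lower()
--     name = name.replace(" ", "_")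
--     name = name.replace("-", "_")
--     name = "".join(c for c in name if c.isalnum() or c == "_")
--
--     # Remove redundant underscores
--     while "__" in name:
--         name = name.replace("__", "_")
--
--     return name.strip("_")
-- ===== SOURCE B (Python) =====
-- def get_output_folder_name(sheet_info):
--     """Sanitize path parts into a lowercase underscore folder name (single pass)."""
--     parent = sheet_info["parent"]
--     folder = sheet_info["folder"]
--     name = (f"{parent}_{folder}" if parent else folder).lower()
--     out = []
--     for c in name:
--         if c.isalnum():
--             out.append(c)
--         elif c in " -_":
--             if out and out[-1] != "_":
--                 out.append("_")
--     return "".join(out).strip("_")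
-- ===== Notes on version B (the rewrite author's own statement) =====
-- stated objective: simpler
-- what changed: A's two whole-string replace passes, the alnum-filter join and the repeated while-'__'-collapse replace passes are fused into one left-to-right scan that appends an alnum char, or a single '_' for space/dash/underscore when the last appended char is not already '_', then strips edge underscores.
import Mathlib
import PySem

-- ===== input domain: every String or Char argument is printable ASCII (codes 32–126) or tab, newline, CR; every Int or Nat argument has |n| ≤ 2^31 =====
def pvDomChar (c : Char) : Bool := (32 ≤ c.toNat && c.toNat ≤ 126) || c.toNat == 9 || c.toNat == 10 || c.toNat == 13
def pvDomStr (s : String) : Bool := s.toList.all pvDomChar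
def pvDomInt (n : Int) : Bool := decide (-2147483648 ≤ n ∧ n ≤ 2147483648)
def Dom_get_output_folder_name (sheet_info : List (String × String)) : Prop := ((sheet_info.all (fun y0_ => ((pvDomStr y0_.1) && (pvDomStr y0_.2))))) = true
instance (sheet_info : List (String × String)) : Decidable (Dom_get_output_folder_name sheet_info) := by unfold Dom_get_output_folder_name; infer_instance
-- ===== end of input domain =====

-- B replaces A's two whole-string .replace passes, the filtering join and the
-- repeated while-"__"-collapse passes by a single left-to-right scan with a
-- "last emitted char" check; objective: simpler (one scan, one rule per char).

-- ===== PORT A =====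
-- pvRepl2 is a structural characterisation of name.replace("__", "_");
-- pvLoopA's termination cites pvReplUU_lt, which needs this chain of lemmas.
def pvRepl2 : List Char → List Char
  | [] => []
  | [c] => [c]
  | c :: d :: t => if c = '_' ∧ d = '_' then '_' :: pvRepl2 t else c :: pvRepl2 (d :: t)

theorem pvRepl2_cons_ne (c : Char) (t : List Char) (h : c ≠ '_') :
    pvRepl2 (c :: t) = c :: pvRepl2 t := by
  cases t with
  | nil => rfl
  | cons d u => rw [pvRepl2, if_neg (by tauto)]

theorem pvReplace_uu_go (fuel : Nat) (l acc : List Char) (h : l.length ≤ fuel) :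
    PySem.Chars.replace.go ['_', '_'] ['_'] fuel l acc = acc.reverse ++ pvRepl2 l := by
  induction fuel generalizing l acc with
  | zero =>
    cases l with
    | nil => rw [PySem.Chars.replace.go]; simp [pvRepl2]
    | cons c t => simp at h
  | succ n ih =>
    cases l with
    | nil => rw [PySem.Chars.replace.go]; simp [pvRepl2]; all_goals omega
    | cons c t =>
      rw [PySem.Chars.replace.go]
      by_cases hc : c = '_'
      · cases t with
        | nil =>
          have : (['_','_'].isPrefixOf [c]) = false := by simp [List.isPrefixOf]
          rw [this]
          simp only [Bool.false_eq_true, if_neg, not_false_iff]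
          rw [ih [] (c :: acc) (by simp)]
          simp [pvRepl2]
        | cons d u =>
          by_cases hd : d = '_'
          · subst hc hd
            have : (['_','_'].isPrefixOf ('_' :: '_' :: u)) = true := by simp [List.isPrefixOf]
            rw [this, if_pos rfl]
            rw [ih _ _ (by simp at h ⊢; omega)]
            rw [pvRepl2, if_pos ⟨rfl, rfl⟩]
            simp
          · subst hc
            have : (['_','_'].isPrefixOf ('_' :: d :: u)) = false := by
              simp [List.isPrefixOf]; exact fun h' => absurd h'.symm hd
            rw [this]
            simp only [Bool.false_eq_true, if_neg, not_false_iff]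
            rw [ih _ _ (by simp at h ⊢; omega)]
            rw [pvRepl2, if_neg (by tauto)]
            simp
      · have : (['_','_'].isPrefixOf (c :: t)) = false := by
          cases t <;> simp [List.isPrefixOf] <;> exact fun h' => absurd h'.symm hc
        rw [this]
        simp only [Bool.false_eq_true, if_neg, not_false_iff]
        rw [ih _ _ (by simp at h ⊢; omega)]
        rw [pvRepl2_cons_ne c t hc]
        simp

theorem pvReplace_uu (s : List Char) :
    PySem.Chars.replace s ['_', '_'] ['_'] = pvRepl2 s := by
  rw [PySem.Chars.replace]
  simp only [List.isEmpty_cons, Bool.false_eq_true, if_neg, not_false_iff]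
  exact pvReplace_uu_go s.length s [] le_rfl

theorem pvRepl2_length_le (s : List Char) : (pvRepl2 s).length ≤ s.length := by
  induction s using pvRepl2.induct with
  | case1 => simp [pvRepl2]
  | case2 c => simp [pvRepl2]
  | case3 c d t h ih => rw [pvRepl2, if_pos h]; simp; omega
  | case4 c d t h ih =>
    rw [pvRepl2, if_neg h]
    simp only [List.length_cons] at ih ⊢; omega

theorem pvRepl2_length_lt (s : List Char) (hin : ['_', '_'] <:+: s) :
    (pvRepl2 s).length < s.length := by
  induction s using pvRepl2.induct with
  | case1 => exact absurd hin.length_le (by simp)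
  | case2 c => exact absurd hin.length_le (by simp)
  | case3 c d t h ih =>
    rw [pvRepl2, if_pos h]
    have := pvRepl2_length_le t
    simp; omega
  | case4 c d t h ih =>
    rw [pvRepl2, if_neg h]
    have ht : ['_', '_'] <:+: (d :: t) := by
      rcases (List.infix_cons_iff).mp hin with hp | hi
      · rcases (List.cons_prefix_cons.mp hp) with ⟨rfl, hp2⟩
        rcases (List.cons_prefix_cons.mp hp2) with ⟨rfl, _⟩
        exact absurd ⟨rfl, rfl⟩ h
      · exact hi
    have := ih ht
    simp only [List.length_cons] at this ⊢; omega

theorem pvReplUU_lt (s : List Char) (h : PySem.Chars.isIn ['_', '_'] s = true) :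
    (PySem.Chars.replace s ['_', '_'] ['_']).length < s.length := by
  rw [pvReplace_uu]
  exact pvRepl2_length_lt s ((PySem.Chars.isIn_iff_infix _ _).mp h)

-- while "__" in name: name = name.replace("__", "_")
def pvLoopA (s : List Char) : List Char :=
  if h : PySem.Chars.isIn ['_', '_'] s = true then
    pvLoopA (PySem.Chars.replace s ['_', '_'] ['_'])
  else s
termination_by s.length
decreasing_by exact pvReplUU_lt s h

def get_output_folder_name (sheet_info : List (String × String)) : String :=
  match PySem.Dict.get? (PySem.Dict.mk sheet_info) "parent", PySem.Dict.get? (PySem.Dict.mk sheet_info) "folder" with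
  | some parent, some folder =>
    -- f"{parent}_{folder}" is exactly this list concatenation
    let name := if parent.toList ≠ [] then parent.toList ++ '_' :: folder.toList
                else folder.toList
    let name := PySem.Chars.lower name
    let name := PySem.Chars.replace name [' '] ['_']
    let name := PySem.Chars.replace name ['-'] ['_']
    let name := name.filter (fun c => PySem.Chars.isalnum c || c == '_')
    let name := pvLoopA name
    String.mk (PySem.Chars.stripChars name ['_'])
  | _, _ => ""  -- KeyError; excluded by Pre_

-- ===== PORT B =====
def get_output_folder_name_alt (sheet_info : List (String × String)) : String :=
  match PySem.Dict.get? (PySem.Dict.mk sheet_info) "parent" with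
  | none => ""  -- KeyError; excluded by Pre_
  | some parent =>
    match PySem.Dict.get? (PySem.Dict.mk sheet_info) "folder" with
    | none => ""  -- KeyError; excluded by Pre_
    | some folder =>
    let name := if parent.toList ≠ [] then parent.toList ++ '_' :: folder.toList
                else folder.toList
    let name := PySem.Chars.lower name
    let out := name.foldl (fun out c =>
      if PySem.Chars.isalnum c then out ++ [c]
      else if c = ' ' ∨ c = '-' ∨ c = '_' then
        (if out ≠ [] ∧ out.getLast? ≠ some '_' then out ++ ['_'] else out)
      else out) []
    String.mk (PySem.Chars.stripChars out ['_'])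

-- ===== PRECONDITION & SPEC =====
-- A raises KeyError unless both keys "parent" and "folder" are present.
def Pre_get_output_folder_name (sheet_info : List (String × String)) : Prop :=
  (PySem.Dict.get? (PySem.Dict.mk sheet_info) "parent").isSome = true ∧
  (PySem.Dict.get? (PySem.Dict.mk sheet_info) "folder").isSome = true
instance (sheet_info : List (String × String)) : Decidable (Pre_get_output_folder_name sheet_info) := by unfold Pre_get_output_folder_name; infer_instance

def pvWitness_get_output_folder_name : (List (String × String)) :=
  [("parent", "AC Default"), ("folder", "My-Sheets!")]

def Spec_get_output_folder_name (sheet_info : List (String × String)) (out : String) : Prop := out = get_output_folder_name_alt sheet_info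
instance (sheet_info : List (String × String)) (out : String) : Decidable (Spec_get_output_folder_name sheet_info out) := by unfold Spec_get_output_folder_name; infer_instance

-- ===== CLAIM (what is proved, stated in full; the proofs are below) =====
def Claim_equal_get_output_folder_name : Prop := ∀ (sheet_info : List (String × String)), Dom_get_output_folder_name sheet_info → Pre_get_output_folder_name sheet_info → Spec_get_output_folder_name sheet_info (get_output_folder_name sheet_info)

-- ===== LEMMAS AND PROOFS =====

-- single-character str.replace is a map
theorem pvReplace_single_go (a b : Char) (fuel : Nat) (l acc : List Char) (h : l.length ≤ fuel) :
    PySem.Chars.replace.go [a] [b] fuel l acc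
      = acc.reverse ++ l.map (fun c => if c = a then b else c) := by
  induction fuel generalizing l acc with
  | zero =>
    cases l with
    | nil => rw [PySem.Chars.replace.go]; simp
    | cons c t => simp at h
  | succ n ih =>
    cases l with
    | nil => rw [PySem.Chars.replace.go]; simp; all_goals omega
    | cons c t =>
      rw [PySem.Chars.replace.go]
      by_cases hc : c = a
      · subst hc
        have : ([c].isPrefixOf (c :: t)) = true := by simp [List.isPrefixOf]
        rw [this, if_pos rfl]
        rw [ih _ _ (by simp at h ⊢; omega)]
        simp
      · have : ([a].isPrefixOf (c :: t)) = false := by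
          simp [List.isPrefixOf]; exact fun h' => absurd h'.symm hc
        rw [this]
        simp only [Bool.false_eq_true, if_neg, not_false_iff]
        rw [ih _ _ (by simp at h ⊢; omega)]
        simp [hc]

theorem pvReplace_single (s : List Char) (a b : Char) :
    PySem.Chars.replace s [a] [b] = s.map (fun c => if c = a then b else c) := by
  rw [PySem.Chars.replace]
  simp only [List.isEmpty_cons, Bool.false_eq_true, if_neg, not_false_iff]
  exact pvReplace_single_go a b s.length s [] le_rfl

-- the canonical collapsed form both programs reach
def pvSqueeze : List Char → List Char
  | [] => []
  | c :: t =>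
    if c = '_' then '_' :: pvSqueeze (t.dropWhile (· == '_'))
    else c :: pvSqueeze t
termination_by s => s.length
decreasing_by
  · exact Nat.lt_succ_of_le (List.length_dropWhile_le _ _)
  · simp

theorem pvSqueeze_nil : pvSqueeze [] = [] := by rw [pvSqueeze]

theorem pvSqueeze_us (t : List Char) :
    pvSqueeze ('_' :: t) = '_' :: pvSqueeze (t.dropWhile (· == '_')) := by
  rw [pvSqueeze, if_pos rfl]

theorem pvSqueeze_ne (c : Char) (t : List Char) (h : c ≠ '_') :
    pvSqueeze (c :: t) = c :: pvSqueeze t := by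
  rw [pvSqueeze, if_neg h]

theorem pvSqueeze_of_not_infix (s : List Char) (h : ¬ ['_', '_'] <:+: s) :
    pvSqueeze s = s := by
  induction s with
  | nil => exact pvSqueeze_nil
  | cons c t ih =>
    have ht : ¬ ['_', '_'] <:+: t := fun h' => h (List.infix_cons_iff.mpr (Or.inr h'))
    by_cases hc : c = '_'
    · subst hc
      rw [pvSqueeze_us]
      cases t with
      | nil => simp [pvSqueeze_nil]
      | cons d u =>
        have hd : d ≠ '_' := by
          rintro rfl
          exact h (List.infix_cons_iff.mpr (Or.inl (by simp [List.cons_prefix_cons])))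
        rw [List.dropWhile_cons_of_neg (by simp [hd])]
        rw [ih ht]
    · rw [pvSqueeze_ne c t hc, ih ht]

theorem pvSqueeze_repl2 (s : List Char) :
    pvSqueeze ((pvRepl2 s).dropWhile (· == '_')) = pvSqueeze (s.dropWhile (· == '_')) ∧
    pvSqueeze (pvRepl2 s) = pvSqueeze s := by
  induction s using pvRepl2.induct with
  | case1 => exact ⟨rfl, rfl⟩
  | case2 c => exact ⟨rfl, rfl⟩
  | case3 c d t h ih =>
    obtain ⟨rfl, rfl⟩ := h
    rw [pvRepl2, if_pos ⟨rfl, rfl⟩]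
    constructor
    · rw [List.dropWhile_cons_of_pos (by simp), List.dropWhile_cons_of_pos (by simp),
          List.dropWhile_cons_of_pos (by simp)]
      exact ih.1
    · rw [pvSqueeze_us, pvSqueeze_us, List.dropWhile_cons_of_pos (by simp), ih.1]
  | case4 c d t h ih =>
    rw [pvRepl2, if_neg h]
    by_cases hc : c = '_'
    · subst hc
      have hd : d ≠ '_' := fun hd => h ⟨rfl, hd⟩
      have hrep : pvRepl2 (d :: t) = d :: pvRepl2 t := pvRepl2_cons_ne d t hd
      constructor
      · rw [List.dropWhile_cons_of_pos (by simp), List.dropWhile_cons_of_pos (by simp), hrep,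
            List.dropWhile_cons_of_neg (by simp [hd]), List.dropWhile_cons_of_neg (by simp [hd]),
            ← hrep]
        exact ih.2
      · rw [pvSqueeze_us, pvSqueeze_us, hrep,
            List.dropWhile_cons_of_neg (by simp [hd]), List.dropWhile_cons_of_neg (by simp [hd]),
            ← hrep, ih.2]
    · constructor
      · rw [List.dropWhile_cons_of_neg (by simp [hc]), List.dropWhile_cons_of_neg (by simp [hc]),
            pvSqueeze_ne c _ hc, pvSqueeze_ne c _ hc, ih.2]
      · rw [pvSqueeze_ne c _ hc, pvSqueeze_ne c _ hc, ih.2]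

theorem pvLoopA_eq (s : List Char) : pvLoopA s = pvSqueeze s := by
  rw [pvLoopA]
  by_cases h : PySem.Chars.isIn ['_', '_'] s = true
  · rw [dif_pos h, pvReplace_uu, pvLoopA_eq (pvRepl2 s), (pvSqueeze_repl2 s).2]
  · rw [dif_neg h]
    refine (pvSqueeze_of_not_infix s ?_).symm
    intro hinf
    exact h ((PySem.Chars.isIn_iff_infix _ _).mpr hinf)
termination_by s.length
decreasing_by exact pvRepl2_length_lt s ((PySem.Chars.isIn_iff_infix _ _).mp h)

-- what A's replace/replace/filter pipeline keeps of each character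
def pvFilt : List Char → List Char
  | [] => []
  | c :: t =>
    if PySem.Chars.isalnum c then c :: pvFilt t
    else if c = ' ' ∨ c = '-' ∨ c = '_' then '_' :: pvFilt t
    else pvFilt t

theorem pvAl_space : PySem.Chars.isalnum ' ' = false := by decide
theorem pvAl_dash : PySem.Chars.isalnum '-' = false := by decide
theorem pvAl_us : PySem.Chars.isalnum '_' = false := by decide

theorem pvFilter_eq (s : List Char) :
    ((s.map (fun c => if c = ' ' then '_' else c)).map
        (fun c => if c = '-' then '_' else c)).filter
      (fun c => PySem.Chars.isalnum c || c == '_') = pvFilt s := by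
  induction s with
  | nil => rfl
  | cons c t ih =>
    simp only [List.map_map] at ih ⊢
    rw [List.map_cons, List.filter_cons, pvFilt]
    by_cases h1 : c = ' '
    · subst h1
      simpa [pvAl_space, pvAl_us] using ih
    · by_cases h2 : c = '-'
      · subst h2
        simpa [pvAl_dash, pvAl_us] using ih
      · by_cases ha : PySem.Chars.isalnum c = true
        · simp [h1, h2, ha, ih]
        · by_cases hu : c = '_'
          · subst hu
            simpa [pvAl_us] using ih
          · simp [h1, h2, ha, hu, ih]

-- B's loop state, recursion on the remaining input
def pvG : Option Char → List Char → List Char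
  | _, [] => []
  | last, c :: t =>
    if PySem.Chars.isalnum c then c :: pvG (some c) t
    else if c = ' ' ∨ c = '-' ∨ c = '_' then
      (if last.isSome = true ∧ last ≠ some '_' then '_' :: pvG (some '_') t else pvG last t)
    else pvG last t

theorem pvFold_eq (l : List Char) (out : List Char) :
    l.foldl (fun out c =>
        if PySem.Chars.isalnum c then out ++ [c]
        else if c = ' ' ∨ c = '-' ∨ c = '_' then
          (if out ≠ [] ∧ out.getLast? ≠ some '_' then out ++ ['_'] else out)
        else out) out = out ++ pvG out.getLast? l := by
  induction l generalizing out with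
  | nil => simp [pvG]
  | cons c t ih =>
    rw [List.foldl_cons, pvG]
    by_cases ha : PySem.Chars.isalnum c = true
    · rw [if_pos ha, if_pos ha, ih (out ++ [c]), List.getLast?_concat]
      simp
    · rw [if_neg ha, if_neg ha]
      by_cases hs : c = ' ' ∨ c = '-' ∨ c = '_'
      · rw [if_pos hs, if_pos hs]
        by_cases hcond : out ≠ [] ∧ out.getLast? ≠ some '_'
        · rw [if_pos hcond, if_pos ⟨by simp [List.getLast?_isSome, hcond.1], hcond.2⟩,
              ih (out ++ ['_']), List.getLast?_concat]
          simp
        · rw [if_neg hcond, if_neg (by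
            intro hc
            exact hcond ⟨by simpa [List.getLast?_isSome] using hc.1, hc.2⟩), ih out]
      · rw [if_neg hs, if_neg hs, ih out]

-- B's state machine over the characters A's pipeline keeps
def pvG2 : Option Char → List Char → List Char
  | _, [] => []
  | last, c :: t =>
    if c = '_' then
      (if last.isSome = true ∧ last ≠ some '_' then '_' :: pvG2 (some '_') t else pvG2 last t)
    else c :: pvG2 (some c) t

theorem pvG_filt (l : List Char) (last : Option Char) :
    pvG last l = pvG2 last (pvFilt l) := by
  induction l generalizing last with
  | nil => simp [pvG, pvFilt, pvG2]
  | cons c t ih =>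
    rw [pvG, pvFilt]
    by_cases ha : PySem.Chars.isalnum c = true
    · have hc : c ≠ '_' := by rintro rfl; exact absurd ha (by decide)
      rw [if_pos ha, if_pos ha, pvG2, if_neg hc, ih]
    · rw [if_neg ha, if_neg ha]
      by_cases hs : c = ' ' ∨ c = '-' ∨ c = '_'
      · rw [if_pos hs, if_pos hs, pvG2, if_pos rfl]
        by_cases hcond : last.isSome = true ∧ last ≠ some '_'
        · rw [if_pos hcond, if_pos hcond, ih]
        · rw [if_neg hcond, if_neg hcond, ih]
      · rw [if_neg hs, if_neg hs, ih]

theorem pvG2_squeeze (m : List Char) (last : Option Char) :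
    pvG2 last m = if last.isSome = true ∧ last ≠ some '_' then pvSqueeze m
                  else pvSqueeze (m.dropWhile (· == '_')) := by
  induction m generalizing last with
  | nil => rw [pvG2]; simp [pvSqueeze_nil]
  | cons c t ih =>
    rw [pvG2]
    by_cases hc : c = '_'
    · subst hc
      rw [if_pos rfl]
      by_cases hcond : last.isSome = true ∧ last ≠ some '_'
      · rw [if_pos hcond, if_pos hcond, pvSqueeze_us, ih (some '_')]
        simp
      · rw [if_neg hcond, if_neg hcond, List.dropWhile_cons_of_pos (by simp), ih last,
            if_neg hcond]
    · rw [if_neg hc, ih (some c), if_pos ⟨rfl, by simp [hc]⟩]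
      by_cases hcond : last.isSome = true ∧ last ≠ some '_'
      · rw [if_pos hcond, pvSqueeze_ne c t hc]
      · rw [if_neg hcond, List.dropWhile_cons_of_neg (by simp [hc]), pvSqueeze_ne c t hc]

theorem pvStrip_us (x : List Char) :
    PySem.Chars.stripChars ('_' :: x) ['_'] = PySem.Chars.stripChars x ['_'] := by
  simp only [PySem.Chars.stripChars]
  rw [List.dropWhile_cons_of_pos (by simp)]

theorem pvStrip_squeeze_drop (m : List Char) :
    PySem.Chars.stripChars (pvSqueeze m) ['_']
      = PySem.Chars.stripChars (pvSqueeze (m.dropWhile (· == '_'))) ['_'] := by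
  cases m with
  | nil => rfl
  | cons c t =>
    by_cases hc : c = '_'
    · subst hc
      rw [pvSqueeze_us, List.dropWhile_cons_of_pos (by simp), pvStrip_us]
    · rw [List.dropWhile_cons_of_neg (by simp [hc])]

-- the whole cleanup pipeline, A's form = B's form
theorem pvPipeline (L : List Char) :
    PySem.Chars.stripChars
        (pvLoopA
          (((PySem.Chars.replace (PySem.Chars.replace L [' '] ['_']) ['-'] ['_'])).filter
            (fun c => PySem.Chars.isalnum c || c == '_'))) ['_']
      = PySem.Chars.stripChars
          (L.foldl (fun out c =>
            if PySem.Chars.isalnum c then out ++ [c]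
            else if c = ' ' ∨ c = '-' ∨ c = '_' then
              (if out ≠ [] ∧ out.getLast? ≠ some '_' then out ++ ['_'] else out)
            else out) []) ['_'] := by
  rw [pvReplace_single, pvReplace_single, pvFilter_eq, pvLoopA_eq,
      pvFold_eq L [], pvG_filt, pvG2_squeeze]
  simp only [List.nil_append, Option.isSome_none, Bool.false_eq_true, false_and, if_neg,
    not_false_iff]
  exact pvStrip_squeeze_drop (pvFilt L)

-- ===== VERDICT (by name: the statement is the Claim_ definition above) =====
theorem get_output_folder_name_spec : Claim_equal_get_output_folder_name := by
  intro si _ hpre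
  unfold Spec_get_output_folder_name
  obtain ⟨h1, h2⟩ := hpre
  unfold get_output_folder_name get_output_folder_name_alt
  cases hp : PySem.Dict.get? (PySem.Dict.mk si) "parent" with
  | none => rw [hp] at h1
  | some parent =>
    cases hf : PySem.Dict.get? (PySem.Dict.mk si) "folder" with
    | none => rw [hf] at h2
    | some folder =>
      simp only
      exact congrArg String.mk (pvPipeline _)
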